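-- pv_equiv track=rewrite | github.com/plilja/puzzlesg | cpp/names/names.py | solve
-- ===== SOURCE A (Python) =====
-- def solve(name):
--     ans = float('inf')
--     n = len(name)
--     if n <= 1:
--         return 0
--     for j in range(0, 2):
--         for i in range(n//2 - j, n - 1):
--             diff = palindrome_diff(name, i, i + j)
--             letters_to_add = abs(n - 2*i - 1 - j)
--             ans = min(ans, diff + letters_to_add)
--     return ans
--
-- def palindrome_diff(name, i1, i2):
--     res = 0
--     n = len(name)
--     j = 0
--     while i1 - j >= 0 and i2 + j < n:
--         if name[i1 - j] != name[i2 + j]: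
--             res += 1
--         j += 1
--     return res
-- ===== SOURCE B (Python) =====
-- def solve(name):
--     n = len(name)
--     if n <= 1:
--         return 0
--     # Bucket every mismatched unordered index pair by its index sum (= 2 * center),
--     # then scan the candidate centers once.
--     D = {}
--     for a in range(n):
--         for b in range(a + 1, n):
--             if name[a] != name[b]:
--                 D[a + b] = D.get(a + b, 0) + 1
--     return min(D.get(s, 0) + abs(n - 1 - s) for s in range(2 * (n // 2) - 1, 2 * n - 2))
-- ===== Notes on version B (the rewrite author's own statement) =====
-- stated objective: alternative
-- what changed: Instead of expanding outward around each candidate center with a per-center scanning helper, B makes one pass over all unordered index pairs, bucketing mismatches by index sum into a dict, and then takes the min over candidate centers in a single comprehension.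
import Mathlib
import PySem

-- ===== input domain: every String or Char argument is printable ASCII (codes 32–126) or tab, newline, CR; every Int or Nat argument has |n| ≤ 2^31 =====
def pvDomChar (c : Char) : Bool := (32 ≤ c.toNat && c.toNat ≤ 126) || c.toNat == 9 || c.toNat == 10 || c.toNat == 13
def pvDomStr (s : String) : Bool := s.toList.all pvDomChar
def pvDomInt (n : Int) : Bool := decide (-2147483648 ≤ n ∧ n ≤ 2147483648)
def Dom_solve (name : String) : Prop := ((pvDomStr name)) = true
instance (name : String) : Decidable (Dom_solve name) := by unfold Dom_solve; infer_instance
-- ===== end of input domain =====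

-- B buckets every mismatched index pair by its index sum in one pass and then scans the candidate centers once, instead of A's per-center outward scanning helper (alternative algorithm, same asymptotic cost).

-- ===== PORT A =====
def pdLoop (xs : List Char) (i1 i2 j res : Int) : Int :=
  if h : 0 ≤ i1 - j ∧ i2 + j < (xs.length : Int) then
    pdLoop xs i1 i2 (j + 1)
      (if PySem.List.pyGet? xs (i1 - j) ≠ PySem.List.pyGet? xs (i2 + j) then res + 1 else res)
  else res
termination_by ((xs.length : Int) - (i2 + j)).toNat
decreasing_by omega

def palindromeDiff (xs : List Char) (i1 i2 : Int) : Int := pdLoop xs i1 i2 0 0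

def solve (name : String) : Int :=
  let xs := name.toList
  let n : Int := xs.length
  if n ≤ 1 then 0
  else
    let ans := (PySem.List.pyRange 0 2 1).foldl (fun ans j =>
      (PySem.List.pyRange (PySem.Int.floordiv n 2 - j) (n - 1) 1).foldl (fun ans i =>
        let diff := palindromeDiff xs i (i + j)
        let lettersToAdd := |n - 2*i - 1 - j|
        some (match ans with
              | none => diff + lettersToAdd
              | some a => min a (diff + lettersToAdd))) ans) (none : Option Int)
    ans.getD 0

-- ===== PORT B =====
def solve_alt (name : String) : Int :=
  let xs := name.toList
  let n : Int := xs.length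
  if n ≤ 1 then 0
  else
    let D := (PySem.List.pyRange 0 n 1).foldl (fun D a =>
      (PySem.List.pyRange (a + 1) n 1).foldl (fun D b =>
        if PySem.List.pyGet? xs a ≠ PySem.List.pyGet? xs b
        then D.modify (a + b) 0 (· + 1) else D) D) (PySem.Dict.empty : PySem.Dict Int Int)
    let cands := (PySem.List.pyRange (2 * PySem.Int.floordiv n 2 - 1) (2 * n - 2) 1).map
      (fun s => D.getD s 0 + |n - 1 - s|)
    (PySem.List.min? cands (fun x => x)).getD 0

-- ===== PRECONDITION & SPEC =====
def Spec_solve (name : String) (out : Int) : Prop := out = solve_alt name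
instance (name : String) (out : Int) : Decidable (Spec_solve name out) := by unfold Spec_solve; infer_instance

-- ===== CLAIM (what is proved, stated in full; the proofs are below) =====
def Claim_equal_solve : Prop := ∀ (name : String), Dom_solve name → Spec_solve name (solve name)

-- ===== LEMMAS AND PROOFS =====

def centerP (xs : List Char) (s a : Int) : Bool :=
  decide (a < s - a ∧ s - a < (xs.length : Int) ∧
    PySem.List.pyGet? xs a ≠ PySem.List.pyGet? xs (s - a))

def centerCnt (xs : List Char) (s : Int) : Int :=
  ((PySem.List.pyRange 0 (xs.length : Int) 1).countP (centerP xs s) : Int)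

theorem pdLoop_eq (xs : List Char) (i1 i2 j res : Int) :
    pdLoop xs i1 i2 j res = res +
      ((PySem.List.pyRange (max 0 (i1 + i2 - (xs.length : Int) + 1)) (i1 - j + 1) 1).countP
        (fun a => decide (PySem.List.pyGet? xs a ≠ PySem.List.pyGet? xs (i1 + i2 - a))) : Int) := by
  fun_induction pdLoop with
  | case1 j res h ih =>
    simp only [dite_eq_ite] at ih
    rw [ih]
    have hr : i1 - (j + 1) + 1 = i1 - j := by ring
    rw [hr]
    have hle : max 0 (i1 + i2 - (xs.length : Int) + 1) ≤ i1 - j := by omega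
    rw [show i1 - j + 1 = (i1 - j) + 1 from rfl, PySem.List.pyRange_one_succ_right hle]
    rw [List.countP_append]
    have harg : i1 + i2 - (i1 - j) = i2 + j := by ring
    simp only [List.countP_cons, List.countP_nil, harg]
    simp only [decide_eq_true_eq, Nat.zero_add]
    split_ifs with hm <;> push_cast <;> omega
  | case2 j res h =>
    have he : PySem.List.pyRange (max 0 (i1 + i2 - (xs.length : Int) + 1)) (i1 - j + 1) = [] :=
      PySem.List.pyRange_one_eq_nil (by omega)
    simp [he]

theorem pdiff_eq (xs : List Char) (i1 i2 : Int) (h0 : 0 ≤ i1) (h1 : i1 ≤ i2)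
    (h2 : i2 ≤ i1 + 1) (h3 : i2 < (xs.length : Int)) :
    palindromeDiff xs i1 i2 = centerCnt xs (i1 + i2) := by
  have hlen : i1 + 1 ≤ (xs.length : Int) := by omega
  rw [palindromeDiff, pdLoop_eq]
  rw [show i1 - 0 + 1 = i1 + 1 from by ring]
  rw [centerCnt]
  set L : Int := (xs.length : Int) with hL
  set lo : Int := max 0 (i1 + i2 - L + 1) with hlo
  rw [PySem.List.pyRange_one_append 0 lo L (by omega) (by omega),
      PySem.List.pyRange_one_append lo (i1 + 1) L (by omega) (by omega)]
  rw [List.countP_append, List.countP_append]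
  have hz1 : (PySem.List.pyRange 0 lo).countP (centerP xs (i1 + i2)) = 0 := by
    rw [List.countP_eq_zero]
    intro a ha
    rw [PySem.List.mem_pyRange_one] at ha
    simp only [centerP, decide_eq_true_eq]
    rintro ⟨-, hb, -⟩
    omega
  have hz2 : (PySem.List.pyRange (i1 + 1) L).countP (centerP xs (i1 + i2)) = 0 := by
    rw [List.countP_eq_zero]
    intro a ha
    rw [PySem.List.mem_pyRange_one] at ha
    simp only [centerP, decide_eq_true_eq]
    rintro ⟨hb, -, -⟩
    omega
  have hmid : (PySem.List.pyRange lo (i1 + 1)).countP (centerP xs (i1 + i2))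
      = (PySem.List.pyRange lo (i1 + 1)).countP
        (fun a => decide (PySem.List.pyGet? xs a ≠ PySem.List.pyGet? xs (i1 + i2 - a))) := by
    apply List.countP_congr
    intro a ha
    rw [PySem.List.mem_pyRange_one] at ha
    simp only [centerP, decide_eq_true_eq]
    constructor
    · rintro ⟨-, -, hm⟩; exact hm
    · intro hm
      refine ⟨?_, by omega, hm⟩
      by_contra hcon
      have hsa : i1 + i2 - a = a := by omega
      rw [hsa] at hm
      exact hm rfl
  rw [hz1, hz2, hmid]
  push_cast
  omega

theorem inner_getD (xs : List Char) (a s : Int) (d : PySem.Dict Int Int) :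
    ((PySem.List.pyRange (a + 1) (xs.length : Int) 1).foldl (fun D b =>
        if PySem.List.pyGet? xs a ≠ PySem.List.pyGet? xs b
        then D.modify (a + b) 0 (· + 1) else D) d).getD s 0
      = d.getD s 0 + (if centerP xs s a then 1 else 0) := by
  rw [PySem.List.foldl_ite_eq_foldl_filter
        (p := fun b => PySem.List.pyGet? xs a ≠ PySem.List.pyGet? xs b)
        (f := fun (D : PySem.Dict Int Int) b => D.modify (a + b) 0 (· + 1))]
  rw [← List.foldl_map (f := fun b : Int => a + b)
        (g := fun (D : PySem.Dict Int Int) x => D.modify x 0 (· + 1))]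
  rw [PySem.Dict.getD_foldl_modify_add_one]
  congr 1
  have hinj : Function.Injective (fun b : Int => a + b) := fun x y h => by simpa using h
  have hc := List.count_map_of_injective
    ((PySem.List.pyRange (a + 1) (xs.length : Int)).filter
      (fun b => decide (PySem.List.pyGet? xs a ≠ PySem.List.pyGet? xs b)))
    (fun b : Int => a + b) hinj (s - a)
  rw [show a + (s - a) = s from by ring] at hc
  rw [hc]
  by_cases hp : PySem.List.pyGet? xs a ≠ PySem.List.pyGet? xs (s - a)
  · by_cases hmem : s - a ∈ PySem.List.pyRange (a + 1) (xs.length : Int)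
    · rw [List.count_filter (by simpa using hp)]
      rw [List.count_eq_one_of_mem (PySem.List.nodup_pyRange_one _ _) hmem]
      rw [PySem.List.mem_pyRange_one] at hmem
      have : centerP xs s a = true := by
        simp only [centerP, decide_eq_true_eq]
        exact ⟨by omega, by omega, hp⟩
      rw [this]; simp
    · rw [List.count_eq_zero_of_not_mem (by
        intro hin
        exact hmem (List.mem_of_mem_filter hin))]
      rw [PySem.List.mem_pyRange_one] at hmem
      have : centerP xs s a = false := by
        simp only [centerP, decide_eq_false_iff_not]
        rintro ⟨h1, h2, -⟩
        exact hmem ⟨by omega, by omega⟩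
      rw [this]; simp
  · rw [List.count_eq_zero_of_not_mem (by
      intro hin
      exact hp (by simpa using (List.of_mem_filter hin)))]
    have : centerP xs s a = false := by
      simp only [centerP, decide_eq_false_iff_not]
      rintro ⟨-, -, h3⟩
      exact hp h3
    rw [this]; simp

theorem outer_getD (xs : List Char) (s : Int) (l : List Int) (d : PySem.Dict Int Int) :
    (l.foldl (fun D a =>
        (PySem.List.pyRange (a + 1) (xs.length : Int) 1).foldl (fun D b =>
          if PySem.List.pyGet? xs a ≠ PySem.List.pyGet? xs b
          then D.modify (a + b) 0 (· + 1) else D) D) d).getD s 0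
      = d.getD s 0 + (l.countP (centerP xs s) : Int) := by
  induction l generalizing d with
  | nil => simp
  | cons a t ih =>
    rw [List.foldl_cons, ih, inner_getD, List.countP_cons]
    push_cast
    split_ifs <;> omega

theorem dict_eq (xs : List Char) (s : Int) :
    ((PySem.List.pyRange 0 (xs.length : Int) 1).foldl (fun D a =>
        (PySem.List.pyRange (a + 1) (xs.length : Int) 1).foldl (fun D b =>
          if PySem.List.pyGet? xs a ≠ PySem.List.pyGet? xs b
          then D.modify (a + b) 0 (· + 1) else D) D)
        (PySem.Dict.empty : PySem.Dict Int Int)).getD s 0 = centerCnt xs s := by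
  rw [outer_getD]
  simp [centerCnt, PySem.Dict.empty, PySem.Dict.getD, PySem.Dict.get?]

def minStep (o : Option Int) (v : Int) : Option Int :=
  some (match o with | none => v | some a => min a v)

theorem foldMin_some (l : List Int) (a : Int) :
    l.foldl minStep (some a) = some (l.foldl min a) := by
  induction l generalizing a with
  | nil => rfl
  | cons x t ih => simp [List.foldl_cons, minStep, ih]

theorem foldMin_spec (l : List Int) (h : l ≠ []) :
    ∃ m, l.foldl minStep none = some m ∧ m ∈ l ∧ ∀ y ∈ l, m ≤ y := by
  cases l with
  | nil => exact absurd rfl h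
  | cons x t =>
    refine ⟨t.foldl min x, ?_, ?_, ?_⟩
    · rw [List.foldl_cons]
      exact foldMin_some t x
    · rcases PySem.List.foldl_min_mem t x with h1 | h1
      · rw [h1]; exact List.mem_cons_self
      · exact List.mem_cons_of_mem _ h1
    · intro y hy
      rcases List.mem_cons.mp hy with rfl | hy
      · exact (PySem.List.foldl_min_le t y).1
      · exact (PySem.List.foldl_min_le t x).2 y hy

theorem minq_spec (l : List Int) (h : l ≠ []) :
    ∃ m, (PySem.List.min? l (fun y => y)).getD 0 = m ∧ m ∈ l ∧ ∀ y ∈ l, m ≤ y := by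
  cases l with
  | nil => exact absurd rfl h
  | cons x t =>
    refine ⟨t.foldl min x, ?_, ?_, ?_⟩
    · rw [PySem.List.min?_id_cons]; rfl
    · rcases PySem.List.foldl_min_mem t x with h1 | h1
      · rw [h1]; exact List.mem_cons_self
      · exact List.mem_cons_of_mem _ h1
    · intro y hy
      rcases List.mem_cons.mp hy with rfl | hy
      · exact (PySem.List.foldl_min_le t y).1
      · exact (PySem.List.foldl_min_le t x).2 y hy
theorem bridge (xs : List Char) (i j : Int) (hj0 : 0 ≤ j) (hj1 : j ≤ 1) (h0 : 0 ≤ i)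
    (h1 : i + j < (xs.length : Int)) :
    palindromeDiff xs i (i + j) + |(xs.length : Int) - 2*i - 1 - j|
      = centerCnt xs (2*i + j) + |(xs.length : Int) - 1 - (2*i + j)| := by
  rw [pdiff_eq xs i (i + j) h0 (by omega) (by omega) h1]
  rw [show i + (i + j) = 2*i + j from by ring]
  rw [show (xs.length : Int) - 2*i - 1 - j = (xs.length : Int) - 1 - (2*i + j) from by ring]

theorem foldInner (f : Int → Int) (l : List Int) (o : Option Int) :
    l.foldl (fun ans i => some (match ans with
      | none => f i
      | some a => min a (f i))) o
      = (l.map f).foldl minStep o := by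
  rw [List.foldl_map]
  rfl

theorem solve_eq (name : String) : solve name = solve_alt name := by
  simp only [solve, solve_alt]
  generalize name.toList = xs
  by_cases hn : (xs.length : Int) ≤ 1
  · rw [if_pos hn, if_pos hn]
  · rw [if_neg hn, if_neg hn]
    have hfd : PySem.Int.floordiv (xs.length : Int) 2 = (xs.length : Int) / 2 :=
      PySem.Int.floordiv_eq_ediv_of_pos (by norm_num)
    rw [hfd]
    simp only [dict_eq]
    rw [show PySem.List.pyRange (0:Int) 2 = [0, 1] from rfl]
    simp only [List.foldl_cons, List.foldl_nil]
    rw [foldInner, foldInner, ← List.foldl_append]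
    set n : Int := (xs.length : Int) with hndef
    set f0 : Int → Int := fun i => palindromeDiff xs i (i + 0) + |n - 2*i - 1 - 0| with hf0
    set f1 : Int → Int := fun i => palindromeDiff xs i (i + 1) + |n - 2*i - 1 - 1| with hf1
    set w : Int → Int := fun s => centerCnt xs s + |n - 1 - s| with hw
    set E : List Int := (PySem.List.pyRange (n/2 - 0) (n - 1)).map f0
      ++ (PySem.List.pyRange (n/2 - 1) (n - 1)).map f1 with hE
    set C : List Int := (PySem.List.pyRange (2*(n/2) - 1) (2*n - 2)).map w with hC
    have hne : E ≠ [] := by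
      apply List.ne_nil_of_length_pos
      rw [hE]
      simp only [List.length_append, List.length_map, PySem.List.length_pyRange_one]
      omega
    have hneC : C ≠ [] := by
      apply List.ne_nil_of_length_pos
      rw [hC]
      simp only [List.length_map, PySem.List.length_pyRange_one]
      omega
    obtain ⟨mA, hA, hAmem, hAle⟩ := foldMin_spec E hne
    obtain ⟨mB, hB, hBmem, hBle⟩ := minq_spec C hneC
    rw [hA, hB, Option.getD_some]
    have hf : ∀ x, x ∈ E → x ∈ C := by
      intro x hx
      rcases List.mem_append.mp hx with hx | hx
      · obtain ⟨i, hi, rfl⟩ := List.mem_map.mp hx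
        rw [PySem.List.mem_pyRange_one] at hi
        refine List.mem_map.mpr ⟨2*i + 0, PySem.List.mem_pyRange_one.mpr ⟨by omega, by omega⟩, ?_⟩
        exact (bridge xs i 0 (by omega) (by omega) (by omega) (by omega)).symm
      · obtain ⟨i, hi, rfl⟩ := List.mem_map.mp hx
        rw [PySem.List.mem_pyRange_one] at hi
        refine List.mem_map.mpr ⟨2*i + 1, PySem.List.mem_pyRange_one.mpr ⟨by omega, by omega⟩, ?_⟩
        exact (bridge xs i 1 (by omega) (by omega) (by omega) (by omega)).symm
    have hg : ∀ x, x ∈ C → x ∈ E := by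
      intro x hx
      obtain ⟨s, hs, rfl⟩ := List.mem_map.mp hx
      rw [PySem.List.mem_pyRange_one] at hs
      by_cases hpar : s % 2 = 0
      · apply List.mem_append.mpr; left
        refine List.mem_map.mpr ⟨s / 2, PySem.List.mem_pyRange_one.mpr ⟨by omega, by omega⟩, ?_⟩
        have hb := bridge xs (s/2) 0 (by omega) (by omega) (by omega) (by omega)
        rw [show 2*(s/2) + 0 = s from by omega] at hb
        exact hb
      · apply List.mem_append.mpr; right
        refine List.mem_map.mpr ⟨(s - 1) / 2, PySem.List.mem_pyRange_one.mpr ⟨by omega, by omega⟩, ?_⟩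
        have hb := bridge xs ((s - 1)/2) 1 (by omega) (by omega) (by omega) (by omega)
        rw [show 2*((s - 1)/2) + 1 = s from by omega] at hb
        exact hb
    exact le_antisymm (hAle mB (hg mB hBmem)) (hBle mA (hf mA hAmem))

-- ===== VERDICT (by name: the statement is the Claim_ definition above) =====
theorem solve_spec : Claim_equal_solve := by
  intro name _
  exact solve_eq name
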